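-- pv_equiv track=rewrite | github.com/Darshanexe/Portfolio | services/user_service/user_main.py | calculate_brain_level
-- ===== SOURCE A (Python) =====
-- def calculate_brain_level(sparks: int) -> int:
--     """Calculate brain level based on total sparks"""
--     # Level formula: each level requires more sparks
--     # Level 1: 0, Level 2: 100, Level 3: 300, Level 4: 600, etc.
--     level = 1
--     required = 0
--     increment = 100
--
--     while sparks >= required:
--         level += 1
--         required += increment
--         increment += 50
--
--     return level - 1
-- ===== SOURCE B (Python) =====
-- def calculate_brain_level(sparks: int) -> int:
--     # Binary search for the smallest k with 25*k*k + 75*k > sparks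
--     # (the cumulative spark threshold after k level-ups is 25*k^2 + 75*k).
--     if sparks < 0:
--         return 0
--     lo, hi = 0, sparks + 1
--     while hi - lo > 1:
--         mid = (lo + hi) // 2
--         if sparks < 25 * mid * mid + 75 * mid:
--             hi = mid
--         else:
--             lo = mid
--     return hi
-- ===== Notes on version B (the rewrite author's own statement) =====
-- stated objective: faster
-- what changed: Replaces the linear threshold-accumulation loop with a binary search for the smallest k with 25k^2+75k > sparks, using the closed form of the cumulative threshold.
import Mathlib
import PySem

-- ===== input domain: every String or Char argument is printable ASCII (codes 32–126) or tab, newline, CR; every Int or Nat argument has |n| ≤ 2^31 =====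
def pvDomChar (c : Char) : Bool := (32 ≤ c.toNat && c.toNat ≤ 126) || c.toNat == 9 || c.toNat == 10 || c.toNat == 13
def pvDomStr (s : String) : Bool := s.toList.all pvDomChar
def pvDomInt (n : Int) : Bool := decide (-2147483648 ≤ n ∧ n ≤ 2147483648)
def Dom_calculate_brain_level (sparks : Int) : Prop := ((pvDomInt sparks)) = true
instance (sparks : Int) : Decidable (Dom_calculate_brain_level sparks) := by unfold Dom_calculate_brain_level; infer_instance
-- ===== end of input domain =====

-- B replaces A's linear threshold-accumulation loop by a binary search for the
-- smallest k with 25k^2+75k > sparks (asymptotically fewer iterations).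


-- ===== PORT A =====
-- while sparks >= required: level += 1; required += increment; increment += 50
-- (fuel is only a totality guard: (sparks+1).toNat always exceeds the loop's
--  iteration count, since required grows by at least 100 each pass)
def pvAuxA : Int → Nat → Int → Int → Int → Int
  | _, 0, level, _, _ => level - 1
  | sparks, fuel + 1, level, required, increment =>
    if sparks ≥ required then
      pvAuxA sparks fuel (level + 1) (required + increment) (increment + 50)
    else
      level - 1

def calculate_brain_level (sparks : Int) : Int :=
  pvAuxA sparks (sparks + 1).toNat 1 0 100

-- ===== PORT B =====
-- while hi - lo > 1: mid = (lo+hi)//2; if sparks < 25*mid*mid + 75*mid: hi = mid else lo = mid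
-- (fuel is only a totality guard: the interval shrinks every pass, so
--  (sparks+1).toNat passes always suffice)
def pvBsearch : Int → Nat → Int → Int → Int
  | _, 0, _, hi => hi
  | sparks, fuel + 1, lo, hi =>
    if hi - lo > 1 then
      let mid := PySem.Int.floordiv (lo + hi) 2
      if sparks < 25 * mid * mid + 75 * mid then
        pvBsearch sparks fuel lo mid
      else
        pvBsearch sparks fuel mid hi
    else
      hi

def calculate_brain_level_alt (sparks : Int) : Int :=
  if sparks < 0 then 0
  else pvBsearch sparks (sparks + 1).toNat 0 (sparks + 1)

-- ===== PRECONDITION & SPEC =====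
def Spec_calculate_brain_level (sparks : Int) (out : Int) : Prop := out = calculate_brain_level_alt sparks
instance (sparks : Int) (out : Int) : Decidable (Spec_calculate_brain_level sparks out) := by unfold Spec_calculate_brain_level; infer_instance

-- ===== CLAIM (what is proved, stated in full; the proofs are below) =====
def Claim_equal_calculate_brain_level : Prop := ∀ (sparks : Int), Dom_calculate_brain_level sparks → Spec_calculate_brain_level sparks (calculate_brain_level sparks)

-- ===== LEMMAS AND PROOFS =====

-- the cumulative threshold after k level-ups
def pvR (k : Int) : Int := 25 * k * k + 75 * k

-- "k is the answer": 0 for negative sparks, else the least k with sparks < pvR k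
def pvIsAns (s k : Int) : Prop :=
  (s < 0 ∧ k = 0) ∨ (0 ≤ s ∧ 1 ≤ k ∧ s < pvR k ∧ ¬ s < pvR (k - 1))

lemma pvR_mono {j k : Int} (hj : 0 ≤ j) (hjk : j ≤ k) : pvR j ≤ pvR k := by
  unfold pvR; nlinarith

lemma pvR_nonneg {k : Int} (hk : 0 ≤ k) : 0 ≤ pvR k := by
  unfold pvR; nlinarith

lemma pvIsAns_unique {s k1 k2 : Int} (h1 : pvIsAns s k1) (h2 : pvIsAns s k2) : k1 = k2 := by
  rcases h1 with ⟨hs, hk⟩ | ⟨hs, hk1, hP1, hN1⟩ <;>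
    rcases h2 with ⟨hs', hk'⟩ | ⟨hs', hk1', hP1', hN1'⟩
  · omega
  · omega
  · omega
  · by_contra hne
    rcases lt_or_gt_of_ne hne with hlt | hlt
    · exact hN1' (lt_of_lt_of_le hP1 (pvR_mono (by omega) (by omega)))
    · exact hN1 (lt_of_lt_of_le hP1' (pvR_mono (by omega) (by omega)))

-- exit case shared by both branches of A's loop characterization
lemma pvExit (s n : Int) (hn : 0 ≤ n) (hP : s < pvR n)
    (hinv : n = 0 ∨ ¬ s < pvR (n - 1)) : pvIsAns s n := by
  have hR0 : pvR 0 = 0 := by unfold pvR; ring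
  by_cases hs : s < 0
  · left
    refine ⟨hs, ?_⟩
    by_contra hc
    rcases hinv with h0 | hinv
    · exact hc h0
    · have h1 : (0:Int) ≤ n - 1 := by omega
      have := pvR_nonneg h1
      omega
  · right
    have h1 : 1 ≤ n := by
      by_contra hc
      have : n = 0 := by omega
      subst this
      omega
    refine ⟨by omega, h1, hP, ?_⟩
    rcases hinv with h0 | hinv
    · omega
    · exact hinv

-- A's loop: entering iteration n (0-based) with level = n+1, required = pvR n,
-- increment = 100 + 50*n, and ¬ sparks < pvR (n-1) (or n = 0), returns the answer
-- provided the fuel dominates the remaining distance to the threshold.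
lemma pvAuxA_char (s : Int) : ∀ (fuel : Nat) (n : Int), 0 ≤ n →
    (s + 1 - pvR n).toNat ≤ fuel →
    (n = 0 ∨ ¬ s < pvR (n - 1)) →
    pvIsAns s (pvAuxA s fuel (n + 1) (pvR n) (100 + 50 * n)) := by
  intro fuel
  induction fuel with
  | zero =>
    intro n hn hm hinv
    simp only [pvAuxA]
    have e : n + 1 - 1 = n := by ring
    rw [e]
    exact pvExit s n hn (by omega) hinv
  | succ f ih =>
    intro n hn hm hinv
    simp only [pvAuxA]
    by_cases hg : s ≥ pvR n
    · simp only [hg, if_true]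
      have key := ih (n + 1) (by omega)
        (by
          have hle : pvR n + 100 ≤ pvR (n + 1) := by unfold pvR; nlinarith
          omega)
        (by right; simpa using hg)
      have e : pvAuxA s f (n + 1 + 1) (pvR n + (100 + 50 * n)) (100 + 50 * n + 50)
           = pvAuxA s f ((n + 1) + 1) (pvR (n + 1)) (100 + 50 * (n + 1)) := by
        have e1 : pvR n + (100 + 50 * n) = pvR (n + 1) := by unfold pvR; ring
        have e2 : 100 + 50 * n + 50 = 100 + 50 * (n + 1) := by ring
        simp only [e1, e2]
      rw [e]
      exact key
    · simp only [hg, if_false]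
      have e : n + 1 - 1 = n := by ring
      rw [e]
      exact pvExit s n hn (by omega) hinv

-- exit case of B's binary search
lemma pvBExit (s lo hi : Int) (hlo : 0 ≤ lo) (hhi : hi = lo + 1)
    (hNlo : ¬ s < pvR lo) (hPhi : s < pvR hi) : pvIsAns s hi := by
  right
  have hs0 : 0 ≤ s := by
    have := pvR_nonneg hlo; omega
  refine ⟨hs0, by omega, hPhi, ?_⟩
  rw [hhi]
  simpa using hNlo

-- B's binary search: with ¬ s < pvR lo, s < pvR hi, 0 ≤ lo < hi, and fuel
-- dominating the interval length, it returns the answer.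
lemma pvBsearch_char (s : Int) : ∀ (fuel : Nat) (lo hi : Int),
    0 ≤ lo → lo < hi → (hi - lo).toNat ≤ fuel + 1 →
    ¬ s < pvR lo → s < pvR hi →
    pvIsAns s (pvBsearch s fuel lo hi) := by
  intro fuel
  induction fuel with
  | zero =>
    intro lo hi hlo hlt hm hNlo hPhi
    simp only [pvBsearch]
    exact pvBExit s lo hi hlo (by omega) hNlo hPhi
  | succ f ih =>
    intro lo hi hlo hlt hm hNlo hPhi
    simp only [pvBsearch]
    by_cases hg : hi - lo > 1
    · simp only [hg, if_true]
      have h2 := PySem.Int.floordiv_lt_iff_lt_mul (a := lo + hi) (q := hi) (by norm_num : (0:Int) < 2)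
      have h3 := PySem.Int.le_floordiv_iff_mul_le (a := lo + hi) (q := lo + 1) (by norm_num : (0:Int) < 2)
      set mid := PySem.Int.floordiv (lo + hi) 2 with hmid
      have hmlo : lo < mid := by omega
      have hmhi : mid < hi := by omega
      by_cases hb : s < 25 * mid * mid + 75 * mid
      · simp only [hb, if_true]
        exact ih lo mid hlo hmlo (by omega) hNlo (by unfold pvR; omega)
      · simp only [hb, if_false]
        exact ih mid hi (by omega) hmhi (by omega) (by unfold pvR; omega) hPhi
    · simp only [hg, if_false]
      exact pvBExit s lo hi hlo (by omega) hNlo hPhi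

lemma calculate_brain_level_isAns (s : Int) : pvIsAns s (calculate_brain_level s) := by
  unfold calculate_brain_level
  have h := pvAuxA_char s (s + 1).toNat 0 le_rfl (by simp [pvR]) (Or.inl rfl)
  simpa [pvR] using h

lemma calculate_brain_level_alt_isAns (s : Int) : pvIsAns s (calculate_brain_level_alt s) := by
  unfold calculate_brain_level_alt
  by_cases hs : s < 0
  · simp only [hs, if_true]
    exact Or.inl ⟨hs, rfl⟩
  · simp only [hs, if_false]
    apply pvBsearch_char s (s + 1).toNat 0 (s + 1) le_rfl (by omega) (by omega)
    · simp [pvR]; omega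
    · unfold pvR; nlinarith [le_of_not_gt (show ¬ s < 0 from hs)]

-- ===== VERDICT (by name: the statement is the Claim_ definition above) =====
theorem calculate_brain_level_spec : Claim_equal_calculate_brain_level := by
  intro s _
  unfold Spec_calculate_brain_level
  exact pvIsAns_unique (calculate_brain_level_isAns s) (calculate_brain_level_alt_isAns s)
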